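-- pv_equiv track=rewrite | github.com/Cerebras/modelzoo | src/cerebras/modelzoo/data/common/input_utils.py | shard_list_of_chunks_contiguous
-- ===== SOURCE A (Python) =====
-- def shard_list_of_chunks_contiguous(
--     input_list_of_chunks, worker_id, num_workers
-- ):
--     """
--     Shards a list of chunks by distributing contiguous segments of each chunk
--     across shards. If the chunk's length is not divisible by the
--     number of workers, the remainder elements are spread across a subset
--     of the workers such that each worker in the subset receives 1 extra
--     element.
--
--     Args:
--         input_list (list of tuples): list of chunks to shard. List should be of format
--             `[... (chunk_i, length_of_chunk_i), ...]`
--         worker_id (int): index of shard to return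
--         num_workers (int): number of shards to create
--
--     Returns:
--         `worker_id`'s shard: a list of the same length as `input_list` of the
--         format: `[... (chunk_i, shard_start_index_i, shard_length_i), ...]`
--     """
--     output_for_cur_worker = []
--     for elm, chunk_length in input_list_of_chunks:
--         # Try to evenly distribute chunk_length between workers
--         chunk_length_per_worker = [(chunk_length // num_workers)] * num_workers
--         for i in range(chunk_length % num_workers):
--             chunk_length_per_worker[i] += 1
--
--         assert sum(chunk_length_per_worker) == chunk_length
--
--         output_for_cur_worker.append(
--             (
--                 elm,
--                 (
--                     sum(chunk_length_per_worker[:worker_id])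
--                     if worker_id > 0
--                     else 0
--                 ),  # Start index
--                 chunk_length_per_worker[worker_id],  # Length of data chunk
--             )
--         )
--     return output_for_cur_worker
-- ===== SOURCE B (Python) =====
-- def shard_list_of_chunks_contiguous(input_list_of_chunks, worker_id, num_workers):
--     # Closed-form start/length per chunk instead of building a per-worker length list.
--     if not 0 <= worker_id < num_workers:
--         raise IndexError("worker_id out of range")
--     return [
--         (
--             elm,
--             worker_id * (chunk_length // num_workers)
--             + min(worker_id, chunk_length % num_workers)
--             if worker_id > 0
--             else 0,
--             chunk_length // num_workers
--             + (1 if worker_id < chunk_length % num_workers else 0),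
--         )
--         for elm, chunk_length in input_list_of_chunks
--     ]
-- ===== Notes on version B (the rewrite author's own statement) =====
-- stated objective: faster
-- what changed: B replaces A's per-chunk construction of a num_workers-long list (plus slice-and-sum for the start index) with a closed-form start = worker_id*base + min(worker_id, rem) and length = base + (1 if worker_id < rem else 0) per chunk.
-- outside the precondition, e.g. on shard_list_of_chunks_contiguous([(7, 5)], -1, 2): A returns [(7, 0, 2)], B raises IndexError
import Mathlib
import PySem

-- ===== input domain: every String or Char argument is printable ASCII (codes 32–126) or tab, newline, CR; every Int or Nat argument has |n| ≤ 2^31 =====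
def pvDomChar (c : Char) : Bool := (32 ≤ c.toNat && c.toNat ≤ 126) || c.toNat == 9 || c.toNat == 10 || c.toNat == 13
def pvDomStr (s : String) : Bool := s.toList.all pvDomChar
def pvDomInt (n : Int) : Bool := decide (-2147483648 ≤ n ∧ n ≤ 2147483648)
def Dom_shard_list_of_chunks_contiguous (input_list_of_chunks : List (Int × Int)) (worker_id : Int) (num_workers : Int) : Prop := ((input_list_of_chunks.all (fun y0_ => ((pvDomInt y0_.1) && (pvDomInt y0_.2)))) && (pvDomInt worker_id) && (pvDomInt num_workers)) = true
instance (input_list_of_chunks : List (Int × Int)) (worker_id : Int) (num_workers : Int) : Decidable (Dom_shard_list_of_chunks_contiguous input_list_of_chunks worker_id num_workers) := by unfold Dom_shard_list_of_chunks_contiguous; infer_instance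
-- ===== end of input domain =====

-- B computes each chunk's shard start/length by a closed-form formula instead of
-- materialising a per-worker length list: O(n) instead of O(n·num_workers).

-- ===== PORT A =====
def shard_list_of_chunks_contiguous (input_list_of_chunks : List (Int × Int)) (worker_id : Int) (num_workers : Int) : List (Int × Int × Int) :=
  input_list_of_chunks.foldl (fun output_for_cur_worker p =>
    let elm := p.1
    let chunk_length := p.2
    -- chunk_length_per_worker = [chunk_length // num_workers] * num_workers
    -- (held as an Array so the in-place updates below cost O(1), as Python's do)
    let chunk_length_per_worker : Array Int :=
      (PySem.List.pyRepeat [PySem.Int.floordiv chunk_length num_workers] num_workers).toArray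
    -- for i in range(chunk_length % num_workers): chunk_length_per_worker[i] += 1
    -- (i is a range index, 0 ≤ i < length here, so set/get at i.toNat is Python-exact)
    let chunk_length_per_worker :=
      (PySem.List.pyRange 0 (PySem.Int.mod chunk_length num_workers) 1).foldl
        (fun l i => l.setIfInBounds i.toNat (l.getD i.toNat 0 + 1))
        chunk_length_per_worker
    -- the assert always holds when num_workers > 0 (guaranteed by Pre_)
    output_for_cur_worker ++ [(elm,
      (if worker_id > 0 then (PySem.List.slice chunk_length_per_worker.toList none (some worker_id)).sum else 0),
      -- chunk_length_per_worker[worker_id]; in range under Pre_, total via pyGetD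
      PySem.List.pyGetD chunk_length_per_worker.toList worker_id 0)]
  ) []

-- ===== PORT B =====
def shard_list_of_chunks_contiguous_alt (input_list_of_chunks : List (Int × Int)) (worker_id : Int) (num_workers : Int) : List (Int × Int × Int) :=
  -- B raises IndexError when not (0 <= worker_id < num_workers) — outside Pre_;
  -- the total port returns [] there
  if 0 ≤ worker_id ∧ worker_id < num_workers then
  input_list_of_chunks.map (fun p =>
    (p.1,
     if worker_id > 0 then
       worker_id * PySem.Int.floordiv p.2 num_workers + min worker_id (PySem.Int.mod p.2 num_workers)
     else 0,
     PySem.Int.floordiv p.2 num_workers + (if worker_id < PySem.Int.mod p.2 num_workers then 1 else 0)))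
  else []

-- ===== PRECONDITION & SPEC =====
-- Pre_ restricts to the natural domain of a shard index: 0 ≤ worker_id < num_workers.
-- Outside it A raises (num_workers ≤ 0: ZeroDivisionError/AssertionError on nonempty input;
-- worker_id ≥ num_workers: IndexError) or, for -num_workers ≤ worker_id < 0, returns a value
-- via Python's negative-index wraparound, an artefact a shard index never exercises
-- (B raises IndexError on all of these).
def Pre_shard_list_of_chunks_contiguous (input_list_of_chunks : List (Int × Int)) (worker_id : Int) (num_workers : Int) : Prop :=
  0 ≤ worker_id ∧ worker_id < num_workers
instance (input_list_of_chunks : List (Int × Int)) (worker_id : Int) (num_workers : Int) : Decidable (Pre_shard_list_of_chunks_contiguous input_list_of_chunks worker_id num_workers) := by unfold Pre_shard_list_of_chunks_contiguous; infer_instance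
def pvWitness_shard_list_of_chunks_contiguous : (List (Int × Int)) × Int × Int := ([(7, 5), (3, 4)], 1, 3)

def Spec_shard_list_of_chunks_contiguous (input_list_of_chunks : List (Int × Int)) (worker_id : Int) (num_workers : Int) (out : List (Int × Int × Int)) : Prop := out = shard_list_of_chunks_contiguous_alt input_list_of_chunks worker_id num_workers
instance (input_list_of_chunks : List (Int × Int)) (worker_id : Int) (num_workers : Int) (out : List (Int × Int × Int)) : Decidable (Spec_shard_list_of_chunks_contiguous input_list_of_chunks worker_id num_workers out) := by unfold Spec_shard_list_of_chunks_contiguous; infer_instance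

-- ===== CLAIM (what is proved, stated in full; the proofs are below) =====
def Claim_equal_shard_list_of_chunks_contiguous : Prop := ∀ (input_list_of_chunks : List (Int × Int)) (worker_id : Int) (num_workers : Int), Dom_shard_list_of_chunks_contiguous input_list_of_chunks worker_id num_workers → Pre_shard_list_of_chunks_contiguous input_list_of_chunks worker_id num_workers → Spec_shard_list_of_chunks_contiguous input_list_of_chunks worker_id num_workers (shard_list_of_chunks_contiguous input_list_of_chunks worker_id num_workers)

-- ===== LEMMAS AND PROOFS =====

-- Array.getD of a list-backed array is List.getD.
lemma pv_arr_getD (l : List Int) (i : Nat) (d : Int) : (l.toArray).getD i d = l.getD i d := by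
  simp only [Array.getD, List.getD]
  split_ifs with h
  · rw [List.getElem?_eq_getElem (by simpa using h)]
    rfl
  · rw [List.getElem?_eq_none (by simpa using h)]
    rfl

-- The increment loop on [base]*n turns the first r entries into base+1.
lemma pv_bump (base : Int) (r n : Nat) (h : r ≤ n) :
    ((PySem.List.pyRange 0 (r : Int) 1).foldl
        (fun l i => l.setIfInBounds i.toNat (l.getD i.toNat 0 + 1))
        (List.replicate n base).toArray).toList
    = List.replicate r (base + 1) ++ List.replicate (n - r) base := by
  induction r with
  | zero => simp [PySem.List.pyRange_one_eq_nil]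
  | succ r ih =>
    have hrn : r < n := by omega
    have hcast : ((r + 1 : Nat) : Int) = (r : Int) + 1 := by push_cast; ring
    rw [hcast, PySem.List.pyRange_one_succ_right (by positivity), List.foldl_append]
    simp only [List.foldl_cons, List.foldl_nil]
    have harr : (PySem.List.pyRange 0 (r : Int) 1).foldl
        (fun l i => l.setIfInBounds i.toNat (l.getD i.toNat 0 + 1))
        (List.replicate n base).toArray
        = (List.replicate r (base + 1) ++ List.replicate (n - r) base).toArray := by
      rw [← Array.toList_inj, ih (by omega)]
    rw [harr]
    have hi : ((r : Int)).toNat = r := by simp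
    rw [hi, Array.toList_setIfInBounds, pv_arr_getD]
    have hget : (List.replicate r (base + 1) ++ List.replicate (n - r) base).getD r 0 = base := by
      rw [List.getD_eq_getElem _ _ (by simp; omega), List.getElem_append_right (by simp)]
      simp
    rw [hget]
    apply List.ext_getElem
    · simp; omega
    · intro i h1 h2
      rcases lt_trichotomy i r with hi | hi | hi
      · rw [List.getElem_set_ne (by omega)]
        rw [List.getElem_append_left (by simp; omega), List.getElem_append_left (by simp; omega)]
        simp
      · subst hi
        rw [List.getElem_set_self (by omega)]
        rw [List.getElem_append_left (by simp), List.getElem_replicate]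
      · rw [List.getElem_set_ne (by omega)]
        rw [List.getElem_append_right (by simp; omega), List.getElem_append_right (by simp; omega)]
        simp

-- sum of a replicate of Ints
lemma pv_sum_replicate (n : Nat) (x : Int) : (List.replicate n x).sum = n * x := by
  simp [List.sum_replicate, mul_comm]

-- Per-chunk agreement of the two computations, under 0 ≤ w < nw.
lemma pv_elem (L w nw : Int) (hw : 0 ≤ w) (hwn : w < nw) :
    ((if w > 0 then (PySem.List.slice
        ((PySem.List.pyRange 0 (PySem.Int.mod L nw) 1).foldl
          (fun l i => l.setIfInBounds i.toNat (l.getD i.toNat 0 + 1))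
          (PySem.List.pyRepeat [PySem.Int.floordiv L nw] nw).toArray).toList none (some w)).sum else 0),
      PySem.List.pyGetD
        ((PySem.List.pyRange 0 (PySem.Int.mod L nw) 1).foldl
          (fun l i => l.setIfInBounds i.toNat (l.getD i.toNat 0 + 1))
          (PySem.List.pyRepeat [PySem.Int.floordiv L nw] nw).toArray).toList w 0)
    = ((if w > 0 then w * PySem.Int.floordiv L nw + min w (PySem.Int.mod L nw) else 0),
       PySem.Int.floordiv L nw + (if w < PySem.Int.mod L nw then 1 else 0)) := by
  have hnw : 0 < nw := lt_of_le_of_lt hw hwn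
  set base := PySem.Int.floordiv L nw with hbase
  have hr0 : 0 ≤ PySem.Int.mod L nw := PySem.Int.mod_nonneg L hnw
  have hrn : PySem.Int.mod L nw < nw := PySem.Int.mod_lt L hnw
  have hrcast : ((PySem.Int.mod L nw).toNat : Int) = PySem.Int.mod L nw := Int.toNat_of_nonneg hr0
  set r := (PySem.Int.mod L nw).toNat with hrdef
  set n := nw.toNat with hndef
  have hrn' : r ≤ n := by omega
  have hlist :
      ((PySem.List.pyRange 0 (PySem.Int.mod L nw) 1).foldl
          (fun l i => l.setIfInBounds i.toNat (l.getD i.toNat 0 + 1))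
          (PySem.List.pyRepeat [base] nw).toArray).toList
      = List.replicate r (base + 1) ++ List.replicate (n - r) base := by
    rw [PySem.List.pyRepeat_singleton, ← hrcast, ← hndef, pv_bump base r n hrn']
  rw [hlist]
  have hwcast : (w.toNat : Int) = w := Int.toNat_of_nonneg hw
  simp only [Prod.mk.injEq]
  constructor
  · -- start index
    split_ifs with h
    · rw [PySem.List.slice_to _ hw, List.take_append, List.take_replicate, List.take_replicate,
          List.length_replicate]
      simp only [List.sum_append, pv_sum_replicate]
      rcases le_or_gt w (PySem.Int.mod L nw) with hcase | hcase
      · have h1 : min w.toNat r = w.toNat := by omega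
        have h2 : min (w.toNat - r) (n - r) = 0 := by omega
        rw [h1, h2, min_eq_left hcase]
        simp [hwcast]
        ring
      · have hwr : r ≤ w.toNat := by omega
        have h1 : min w.toNat r = r := by omega
        have h2 : min (w.toNat - r) (n - r) = w.toNat - r := by omega
        have h3 : ((w.toNat - r : Nat) : Int) = w - PySem.Int.mod L nw := by omega
        rw [h1, h2, h3, min_eq_right (le_of_lt hcase), hrcast]
        ring
    · rfl
  · -- length
    rw [PySem.List.pyGetD_of_nonneg _ _ hw]
    rcases lt_or_ge w (PySem.Int.mod L nw) with hcase | hcase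
    · have hwr : w.toNat < r := by omega
      rw [if_pos hcase, List.getD_eq_getElem _ _ (by simp; omega),
          List.getElem_append_left (by simpa using hwr)]
      simp
    · have hwr : r ≤ w.toNat := by omega
      have hwn' : w.toNat < n := by omega
      rw [if_neg (not_lt.mpr hcase), List.getD_eq_getElem _ _ (by simp; omega),
          List.getElem_append_right (by simpa using hwr)]
      simp

-- ===== VERDICT (by name: the statement is the Claim_ definition above) =====
theorem shard_list_of_chunks_contiguous_spec : Claim_equal_shard_list_of_chunks_contiguous := by
  intro xs w nw _ hpre
  obtain ⟨hw, hwn⟩ := hpre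
  unfold Spec_shard_list_of_chunks_contiguous
  unfold shard_list_of_chunks_contiguous shard_list_of_chunks_contiguous_alt
  rw [if_pos ⟨hw, hwn⟩, PySem.List.foldl_append_singleton_eq_map]
  apply List.map_congr_left
  intro p _
  have h := pv_elem p.2 w nw hw hwn
  simp only [Prod.mk.injEq] at h
  simp only [Prod.mk.injEq]
  exact ⟨trivial, h.1, h.2⟩
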